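-- pv_equiv track=rewrite | github.com/AvigalK/ToasterTester | snc_analyzer.py | line_fixer
-- ===== SOURCE A (Python) =====
-- def line_fixer(line, queue_lst, output_list):
--     len_q_lst = len(queue_lst)
--     while len(line) > 0:
--         free_spaces = len(queue_lst) - sum(x is not None for x in queue_lst)
--         data_range = min(free_spaces, len(line))
--         words_in_range = line[:data_range]
--         for m in range(data_range):
--             first_index_available = queue_lst.index(None)
--             if first_index_available is not None:
--                 queue_lst[first_index_available] = words_in_range[m]
--         line = line[data_range:]
--         free_spaces -= data_range
--         if free_spaces == 0:
--             i = 0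
--             fixed = []
--             while i < len(queue_lst)-4:
--                 lsb = queue_lst[i]
--                 msb = 16 ** 2 * queue_lst[i + 1]
--                 fixed.append(msb + lsb - 2 ** 16 if (msb + lsb) >= (2 ** 15 - 1) else msb + lsb)
--                 i += 2
--             snc0 = [i for x, i in enumerate(fixed) if x % 3 == 0]
--             snc1 = [i for x, i in enumerate(fixed) if (x - 1) % 3 == 0]
--             snc2 = [i for x, i in enumerate(fixed) if (x - 2) % 3 == 0]
--             snc0.insert(0, 0)
--             snc1.insert(0, 1)
--             snc2.insert(0, 2)
--             output_list.append(snc0)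
--             output_list.append(snc1)
--             output_list.append(snc2)
--             queue_lst = [None for _ in range(len_q_lst)]
--
--     return queue_lst
-- ===== SOURCE B (Python) =====
-- # B: one forward pass fills free slots (no repeated .index(None) scans) and one
-- # round-robin pass partitions the decoded words; equivalence is about the return
-- # value (both fill queue_lst in place on the first round and append to output_list).
-- def line_fixer(line, queue_lst, output_list):
--     n = len(queue_lst)
--     q = queue_lst
--     rest = line
--     while rest:
--         # fill every free slot left-to-right in a single pass
--         k = 0
--         filled = []
--         for v in q:
--             if v is None and k < len(rest):
--                 filled.append(rest[k])
--                 k += 1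
--             else:
--                 filled.append(v)
--         q[:] = filled
--         rest = rest[k:]
--         if q.count(None) == 0:
--             # decode 16-bit little-endian words with the same >= 0x7fff rule
--             fixed = []
--             for i in range(0, len(q) - 4, 2):
--                 w = q[i] + 256 * q[i + 1]
--                 fixed.append(w - 65536 if w >= 32767 else w)
--             # deal the words round-robin into the three channels
--             sncs = ([0], [1], [2])
--             r = 0
--             for w in fixed:
--                 sncs[r].append(w)
--                 r = (r + 1) % 3
--             output_list.append(sncs[0])
--             output_list.append(sncs[1])
--             output_list.append(sncs[2])
--             q = [None] * n
--     return q
-- ===== Notes on version B (the rewrite author's own statement) =====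
-- stated objective: faster
-- what changed: Each queue fill becomes one forward pass over the queue instead of a repeated queue_lst.index(None) scan per inserted word, and the three enumerate-filter comprehensions become one round-robin pass over the decoded words.
import Mathlib
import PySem

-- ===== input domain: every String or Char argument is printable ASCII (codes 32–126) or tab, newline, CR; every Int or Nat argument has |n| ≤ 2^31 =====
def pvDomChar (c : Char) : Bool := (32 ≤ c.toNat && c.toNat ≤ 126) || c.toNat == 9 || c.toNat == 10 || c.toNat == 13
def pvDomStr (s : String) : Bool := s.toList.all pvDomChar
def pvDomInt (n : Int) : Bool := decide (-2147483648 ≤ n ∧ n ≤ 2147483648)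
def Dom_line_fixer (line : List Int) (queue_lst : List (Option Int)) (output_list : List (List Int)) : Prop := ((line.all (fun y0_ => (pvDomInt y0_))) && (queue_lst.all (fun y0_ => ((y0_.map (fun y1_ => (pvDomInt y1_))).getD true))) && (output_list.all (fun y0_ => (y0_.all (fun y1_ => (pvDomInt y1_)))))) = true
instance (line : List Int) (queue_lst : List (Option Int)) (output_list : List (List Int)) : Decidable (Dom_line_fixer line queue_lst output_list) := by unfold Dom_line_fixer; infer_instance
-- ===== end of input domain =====

-- B replaces A's repeated queue_lst.index(None) scans by one forward fill pass and A's three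
-- enumerate-filter scans by one round-robin pass; equivalence is about the RETURN value (both
-- Pythons also fill queue_lst in place on the first round and append the same lists to output_list).

-- ===== PORT A =====
-- queue_lst[i] read as an int: at every read site the queue is fully filled and the index is in
-- range, so the defaults are unreachable
def pvAtQ (q : List (Option Int)) (i : Nat) : Int := (q.getD i none).getD 0

-- 'for m in range(data_range): first = queue_lst.index(None); queue_lst[first] = words_in_range[m]'
-- (the words words_in_range[0], words_in_range[1], … are consumed left to right; Python's
--  ValueError branch of .index — no None present — cannot fire, at most free_spaces words are passed)
def pvFillA : List (Option Int) → List Int → List (Option Int)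
  | q, [] => q
  | q, w :: ws =>
    match PySem.List.index? q (none : Option Int) with
    | some i => pvFillA (q.set i (some w)) ws
    | none => q

-- 'i = 0; while i < len(queue_lst)-4: lsb = …; msb = 16**2 * …; fixed.append(…); i += 2'
def pvFixedA (q : List (Option Int)) (i : Nat) : List Int :=
  if _h : i + 4 < q.length then
    (if 256 * pvAtQ q (i + 1) + pvAtQ q i ≥ 32767
     then 256 * pvAtQ q (i + 1) + pvAtQ q i - 65536
     else 256 * pvAtQ q (i + 1) + pvAtQ q i) :: pvFixedA q (i + 2)
  else []
  termination_by q.length - i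

-- the three enumerate comprehensions plus the three '.insert(0, _)'
def pvSncA (fixed : List Int) : List Int × List Int × List Int :=
  (0 :: ((PySem.List.enumerate fixed).filter (fun p => PySem.Int.mod p.1 3 == 0)).map (·.2),
   1 :: ((PySem.List.enumerate fixed).filter (fun p => PySem.Int.mod (p.1 - 1) 3 == 0)).map (·.2),
   2 :: ((PySem.List.enumerate fixed).filter (fun p => PySem.Int.mod (p.1 - 2) 3 == 0)).map (·.2))

-- the outer 'while len(line) > 0' loop; fuel line.length + 2 bounds its iteration count
-- whenever queue_lst is nonempty (with an empty queue and nonempty line Python loops forever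
-- and both ports return the current queue when the fuel runs out)
def pvLoopA : Nat → Nat → List Int → List (Option Int) → List (List Int) → List (Option Int)
  | 0, _, _, q, _ => q
  | fuel + 1, lenq, line, q, output =>
    if 0 < line.length then
      let free := q.length - q.countP (fun x => x.isSome)
      let dr := min free line.length
      let q2 := pvFillA q (line.take dr)
      let line2 := line.drop dr
      if free - dr = 0 then
        let s := pvSncA (pvFixedA q2 0)
        pvLoopA fuel lenq line2 (List.replicate lenq none) (output ++ [s.1, s.2.1, s.2.2])
      else pvLoopA fuel lenq line2 q2 output
    else q

def line_fixer (line : List Int) (queue_lst : List (Option Int)) (output_list : List (List Int)) : List (Option Int) :=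
  pvLoopA (line.length + 2) queue_lst.length line queue_lst output_list

-- ===== PORT B =====
-- one pass: 'for v in q: if v is None and k < len(rest): filled.append(rest[k]); k += 1 else: filled.append(v)'
def pvFillB (q : List (Option Int)) (rest : List Int) : List (Option Int) × Nat :=
  q.foldl (fun (s : List (Option Int) × Nat) v =>
    if v = none ∧ s.2 < rest.length then (s.1 ++ [some (rest.getD s.2 0)], s.2 + 1)
    else (s.1 ++ [v], s.2)) ([], 0)

-- 'fixed = []; for i in range(0, len(q) - 4, 2): w = q[i] + 256*q[i+1]; fixed.append(…)'
def pvFixedB (q : List (Option Int)) : List Int :=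
  (PySem.List.pyRange 0 ((q.length : Int) - 4) 2).map (fun i =>
    if pvAtQ q i.toNat + 256 * pvAtQ q (i.toNat + 1) ≥ 32767
    then pvAtQ q i.toNat + 256 * pvAtQ q (i.toNat + 1) - 65536
    else pvAtQ q i.toNat + 256 * pvAtQ q (i.toNat + 1))

-- 'sncs = ([0],[1],[2]); r = 0; for w in fixed: sncs[r].append(w); r = (r+1) % 3'
def pvSncB (fixed : List Int) : List Int × List Int × List Int :=
  (fixed.foldl (fun (s : (List Int × List Int × List Int) × Nat) w =>
    (if s.2 = 0 then (s.1.1 ++ [w], s.1.2.1, s.1.2.2)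
     else if s.2 = 1 then (s.1.1, s.1.2.1 ++ [w], s.1.2.2)
     else (s.1.1, s.1.2.1, s.1.2.2 ++ [w]), (s.2 + 1) % 3)) (([0], [1], [2]), 0)).1

-- the outer 'while rest:' loop, same fuel convention as port A
def pvLoopB : Nat → Nat → List Int → List (Option Int) → List (List Int) → List (Option Int)
  | 0, _, _, q, _ => q
  | fuel + 1, n, rest, q, output =>
    if 0 < rest.length then
      let p := pvFillB q rest
      let rest2 := rest.drop p.2
      if p.1.count (none : Option Int) = 0 then
        let s := pvSncB (pvFixedB p.1)
        pvLoopB fuel n rest2 (List.replicate n none) (output ++ [s.1, s.2.1, s.2.2])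
      else pvLoopB fuel n rest2 p.1 output
    else q

def line_fixer_alt (line : List Int) (queue_lst : List (Option Int)) (output_list : List (List Int)) : List (Option Int) :=
  pvLoopB (line.length + 2) queue_lst.length line queue_lst output_list

-- ===== PRECONDITION & SPEC =====
def Spec_line_fixer (line : List Int) (queue_lst : List (Option Int)) (output_list : List (List Int)) (out : List (Option Int)) : Prop := out = line_fixer_alt line queue_lst output_list
instance (line : List Int) (queue_lst : List (Option Int)) (output_list : List (List Int)) (out : List (Option Int)) : Decidable (Spec_line_fixer line queue_lst output_list out) := by unfold Spec_line_fixer; infer_instance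

-- ===== CLAIM (what is proved, stated in full; the proofs are below) =====
def Claim_equal_line_fixer : Prop := ∀ (line : List Int) (queue_lst : List (Option Int)) (output_list : List (List Int)), Dom_line_fixer line queue_lst output_list → Spec_line_fixer line queue_lst output_list (line_fixer line queue_lst output_list)

-- ===== LEMMAS AND PROOFS =====

-- proof-only functional description of one fill pass over the queue
def fillSpec : List (Option Int) → List Int → List (Option Int)
  | [], _ => []
  | some v :: q, ws => some v :: fillSpec q ws
  | none :: q, [] => none :: fillSpec q []
  | none :: q, w :: ws => some w :: fillSpec q ws

lemma fillSpec_nil : ∀ q : List (Option Int), fillSpec q [] = q := by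
  intro q; induction q with
  | nil => rfl
  | cons v q ih => cases v <;> simp [fillSpec, ih]

lemma fillSpec_of_count_zero : ∀ (q : List (Option Int)) rest, q.count (none : Option Int) = 0 → fillSpec q rest = q := by
  intro q; induction q with
  | nil => intro rest _; rfl
  | cons v q ih =>
    intro rest h
    cases v with
    | none => simp [List.count_cons] at h
    | some x =>
      simp at h
      cases rest <;> simp [fillSpec, ih _ h]

lemma count_none_eq (q : List (Option Int)) :
    q.length - q.countP (fun x => x.isSome) = q.count (none : Option Int) := by
  induction q with
  | nil => rfl
  | cons v q ih =>
    have hle := List.countP_le_length (l := q) (p := fun x => x.isSome)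
    cases v <;> simp [List.countP_cons, List.count_cons] <;> omega

lemma count_fillSpec : ∀ (q : List (Option Int)) rest,
    (fillSpec q rest).count (none : Option Int)
      = q.count (none : Option Int) - min (q.count (none : Option Int)) rest.length := by
  intro q; induction q with
  | nil => intro rest; simp [fillSpec]
  | cons v q ih =>
    intro rest
    cases v with
    | some x =>
      cases rest with
      | nil => simp [fillSpec, List.count_cons, ih]
      | cons r rs => simp [fillSpec, List.count_cons, ih]
    | none =>
      cases rest with
      | nil => simp [fillSpec, List.count_cons, fillSpec_nil]
      | cons r rs =>
        simp [fillSpec, List.count_cons, ih rs]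

-- B's fold computes fillSpec and consumes min(#None, len rest) words
lemma fillB_go (rest : List Int) : ∀ (q : List (Option Int)) (acc : List (Option Int)) (k : Nat),
    q.foldl (fun (s : List (Option Int) × Nat) v =>
      if v = none ∧ s.2 < rest.length then (s.1 ++ [some (rest.getD s.2 0)], s.2 + 1)
      else (s.1 ++ [v], s.2)) (acc, k)
    = (acc ++ fillSpec q (rest.drop k), k + min (q.count (none : Option Int)) (rest.length - k)) := by
  intro q; induction q with
  | nil => intro acc k; simp [fillSpec]
  | cons v q ih =>
    intro acc k
    cases v with
    | some x =>
      have hd : fillSpec (some x :: q) (rest.drop k) = some x :: fillSpec q (rest.drop k) := by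
        cases h : rest.drop k <;> simp [fillSpec]
      rw [List.foldl_cons, if_neg (by simp), ih, hd]
      simp [List.count_cons]
    | none =>
      by_cases h : k < rest.length
      · have hdrop : rest.drop k = rest[k] :: rest.drop (k + 1) := (List.getElem_cons_drop h).symm
        have hgd : rest.getD k 0 = rest[k] := List.getD_eq_getElem rest 0 h
        rw [List.foldl_cons, if_pos ⟨rfl, h⟩, ih, hdrop]
        simp only [hgd, fillSpec, List.count_cons]
        simp
        omega
      · have hdrop : rest.drop k = [] := by simp [List.drop_eq_nil_iff]; omega
        rw [List.foldl_cons, if_neg (by simp [h]), ih, hdrop]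
        simp [fillSpec, fillSpec_nil, List.count_cons]
        omega

lemma fillB_eq (q : List (Option Int)) (rest : List Int) :
    pvFillB q rest = (fillSpec q rest, min (q.count (none : Option Int)) rest.length) := by
  unfold pvFillB
  rw [fillB_go rest q [] 0]
  simp

-- replacing the first None with w and then filling = filling with w as the first word
lemma fillSpec_set_first : ∀ (q : List (Option Int)) (i : Nat) (w : Int) rest,
    PySem.List.index? q (none : Option Int) = some i →
    fillSpec q (w :: rest) = fillSpec (q.set i (some w)) rest := by
  intro q; induction q with
  | nil => intro i w rest h; simp [PySem.List.index?_eq_idxOf?] at h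
  | cons v q ih =>
    intro i w rest h
    cases v with
    | none =>
      rw [PySem.List.index?_cons_self] at h
      cases h
      cases rest <;> simp [fillSpec]
    | some x =>
      rw [PySem.List.index?_cons_of_ne q (by simp)] at h
      cases hj : PySem.List.index? q (none : Option Int) with
      | none => rw [hj] at h; simp at h
      | some j =>
        rw [hj] at h; simp at h
        subst h
        simp only [fillSpec, List.set_cons_succ]
        exact congrArg (some x :: ·) (ih j w rest hj)

lemma set_junction : ∀ (pre suf : List (Option Int)) (w : Int),
    (pre ++ (none : Option Int) :: suf).set pre.length (some w) = pre ++ some w :: suf := by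
  intro pre; induction pre with
  | nil => intro suf w; rfl
  | cons p pre ih => intro suf w; simp [List.set_cons_succ, ih]

lemma count_set_first (q : List (Option Int)) (i : Nat) (w : Int)
    (h : PySem.List.index? q (none : Option Int) = some i) :
    (q.set i (some w)).count (none : Option Int) = q.count (none : Option Int) - 1 := by
  obtain ⟨pre, suf, hq, hlen, hmem⟩ := (PySem.List.index?_eq_some_iff q (none : Option Int) i).1 h
  subst hq; subst hlen
  rw [set_junction]
  have hpre : pre.count (none : Option Int) = 0 := List.count_eq_zero.2 hmem
  simp [List.count_append, hpre]

lemma index?_some_of_count_pos (q : List (Option Int))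
    (h : 0 < q.count (none : Option Int)) :
    ∃ i, PySem.List.index? q (none : Option Int) = some i := by
  have hm : (none : Option Int) ∈ q := List.count_pos_iff.mp h
  exact Option.isSome_iff_exists.mp ((PySem.List.index?_isSome_iff q (none : Option Int)).2 hm)

-- A's repeated index(None)/set loop also computes fillSpec
lemma fillA_eq : ∀ (rest : List Int) (q : List (Option Int)),
    pvFillA q (rest.take (min (q.count (none : Option Int)) rest.length)) = fillSpec q rest := by
  intro rest; induction rest with
  | nil => intro q; simp [pvFillA, fillSpec_nil]
  | cons w rs ih =>
    intro q
    by_cases hc : q.count (none : Option Int) = 0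
    · simp [hc, pvFillA, fillSpec_of_count_zero q _ hc]
    · have hpos : 0 < q.count (none : Option Int) := Nat.pos_of_ne_zero hc
      obtain ⟨i, hi⟩ := index?_some_of_count_pos q hpos
      have hcnt := count_set_first q i w hi
      have hmin : min (q.count (none : Option Int)) (w :: rs).length
          = min ((q.set i (some w)).count (none : Option Int)) rs.length + 1 := by
        simp [hcnt]; omega
      rw [hmin, List.take_succ_cons]
      have hi' : List.idxOf? (none : Option Int) q = some i := by
        rw [← PySem.List.index?_eq_idxOf?]; exact hi
      rw [show pvFillA q (w :: rs.take (min ((q.set i (some w)).count (none : Option Int)) rs.length))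
            = pvFillA (q.set i (some w)) (rs.take (min ((q.set i (some w)).count (none : Option Int)) rs.length)) by
        simp [pvFillA, hi']]
      rw [ih (q.set i (some w)), fillSpec_set_first q i w rs hi]

-- pyRange with step 2 unfolds one element at a time
lemma pyRange_two_cons (a b : Int) (h : a < b) :
    PySem.List.pyRange a b 2 = a :: PySem.List.pyRange (a + 2) b 2 := by
  rw [PySem.List.pyRange_of_pos a b (by norm_num), PySem.List.pyRange_of_pos (a+2) b (by norm_num)]
  have h1 : ((b - a + 2 - 1) / 2).toNat = (if a + 2 < b then ((b - (a+2) + 2 - 1) / 2).toNat else 0) + 1 := by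
    split <;> omega
  rw [if_pos h, h1, List.range_succ_eq_map]
  simp only [List.map_cons, List.map_map]
  congr 1
  · simp
  · split
    · apply List.map_congr_left; intro k _; simp only [Function.comp_apply]; push_cast; ring
    · simp

lemma pyRange_two_nil (a b : Int) (h : b ≤ a) : PySem.List.pyRange a b 2 = [] := by
  rw [PySem.List.pyRange_of_pos a b (by norm_num), if_neg (by omega)]
  simp

lemma fixedA_eq_aux (q : List (Option Int)) : ∀ (i : Nat),
    pvFixedA q i = (PySem.List.pyRange (i : Int) ((q.length : Int) - 4) 2).map (fun j =>
      if pvAtQ q j.toNat + 256 * pvAtQ q (j.toNat + 1) ≥ 32767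
      then pvAtQ q j.toNat + 256 * pvAtQ q (j.toNat + 1) - 65536
      else pvAtQ q j.toNat + 256 * pvAtQ q (j.toNat + 1)) := by
  intro i
  by_cases h : i + 4 < q.length
  · rw [pvFixedA, dif_pos h, pyRange_two_cons (i : Int) ((q.length : Int) - 4) (by omega)]
    rw [List.map_cons]
    rw [show ((i : Int) + 2) = (((i + 2 : Nat) : Int)) by push_cast; ring]
    rw [← fixedA_eq_aux q (i + 2)]
    simp only [Int.toNat_natCast]
    congr 1
    have : 256 * pvAtQ q (i + 1) + pvAtQ q i = pvAtQ q i + 256 * pvAtQ q (i + 1) := by ring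
    rw [this]
  · rw [pvFixedA, dif_neg h, pyRange_two_nil _ _ (by omega)]
    simp
  termination_by i => q.length - i
  decreasing_by omega

lemma fixedA_eq (q : List (Option Int)) : pvFixedA q 0 = pvFixedB q := by
  simpa [pvFixedB] using fixedA_eq_aux q 0

-- the round-robin fold equals the three enumerate-filter comprehensions
lemma snc_go : ∀ (l : List Int) (n : Nat) (a b c : List Int),
    l.foldl (fun (s : (List Int × List Int × List Int) × Nat) w =>
      (if s.2 = 0 then (s.1.1 ++ [w], s.1.2.1, s.1.2.2)
       else if s.2 = 1 then (s.1.1, s.1.2.1 ++ [w], s.1.2.2)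
       else (s.1.1, s.1.2.1, s.1.2.2 ++ [w]), (s.2 + 1) % 3)) ((a, b, c), n % 3)
    = ((a ++ ((PySem.List.enumerate l (n : Int)).filter (fun p => PySem.Int.mod p.1 3 == 0)).map (·.2),
        b ++ ((PySem.List.enumerate l (n : Int)).filter (fun p => PySem.Int.mod (p.1 - 1) 3 == 0)).map (·.2),
        c ++ ((PySem.List.enumerate l (n : Int)).filter (fun p => PySem.Int.mod (p.1 - 2) 3 == 0)).map (·.2)),
       (n + l.length) % 3) := by
  intro l; induction l with
  | nil => intro n a b c; simp [PySem.List.enumerate]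
  | cons w l ih =>
    intro n a b c
    have hmod : PySem.Int.mod ((n : Int)) 3 = ((n % 3 : Nat) : Int) := PySem.Int.mod_natCast n 3
    have hmod1 : PySem.Int.mod ((n : Int) - 1) 3 = ((n : Int) - 1) % 3 :=
      PySem.Int.mod_eq_emod_of_pos (by norm_num)
    have hmod2 : PySem.Int.mod ((n : Int) - 2) 3 = ((n : Int) - 2) % 3 :=
      PySem.Int.mod_eq_emod_of_pos (by norm_num)
    have hn1 : ((n : Int) + 1) = (((n + 1 : Nat) : Int)) := by push_cast; ring
    rw [PySem.List.enumerate_cons, List.foldl_cons]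
    have h3 : n % 3 = 0 ∨ n % 3 = 1 ∨ n % 3 = 2 := by omega
    rcases h3 with h | h | h
    · have c0 : (PySem.Int.mod ((n : Int)) 3 == 0) = true := by rw [hmod, h]; simp
      have c1 : (PySem.Int.mod ((n : Int) - 1) 3 == 0) = false := by rw [hmod1]; simp; omega
      have c2 : (PySem.Int.mod ((n : Int) - 2) 3 == 0) = false := by rw [hmod2]; simp; omega
      simp only [h, if_pos rfl, List.filter_cons, c0, c1, c2]
      rw [show (0 + 1) % 3 = (n + 1) % 3 by omega, ih (n + 1)]
      simp only [hn1, List.map_cons]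
      simp only [Prod.mk.injEq, List.append_assoc]
      refine ⟨⟨by simp, by simp, by simp⟩, by simp only [List.length_cons]; omega⟩
    · have c0 : (PySem.Int.mod ((n : Int)) 3 == 0) = false := by rw [hmod, h]; simp
      have c1 : (PySem.Int.mod ((n : Int) - 1) 3 == 0) = true := by rw [hmod1]; simp; omega
      have c2 : (PySem.Int.mod ((n : Int) - 2) 3 == 0) = false := by rw [hmod2]; simp; omega
      simp only [h, if_neg (by omega : ¬ (1 : Nat) = 0), if_pos rfl, List.filter_cons, c0, c1, c2]
      rw [show (1 + 1) % 3 = (n + 1) % 3 by omega, ih (n + 1)]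
      simp only [hn1, List.map_cons]
      simp only [Prod.mk.injEq, List.append_assoc]
      refine ⟨⟨by simp, by simp, by simp⟩, by simp only [List.length_cons]; omega⟩
    · have c0 : (PySem.Int.mod ((n : Int)) 3 == 0) = false := by rw [hmod, h]; simp
      have c1 : (PySem.Int.mod ((n : Int) - 1) 3 == 0) = false := by rw [hmod1]; simp; omega
      have c2 : (PySem.Int.mod ((n : Int) - 2) 3 == 0) = true := by rw [hmod2]; simp; omega
      simp only [h, if_neg (by omega : ¬ (2 : Nat) = 0), if_neg (by omega : ¬ (2 : Nat) = 1), List.filter_cons, c0, c1, c2]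
      rw [show (2 + 1) % 3 = (n + 1) % 3 by omega, ih (n + 1)]
      simp only [hn1, List.map_cons]
      simp only [Prod.mk.injEq, List.append_assoc]
      refine ⟨⟨by simp, by simp, by simp⟩, by simp only [List.length_cons]; omega⟩

lemma snc_eq (fixed : List Int) : pvSncA fixed = pvSncB fixed := by
  unfold pvSncA pvSncB
  have h := snc_go fixed 0 [0] [1] [2]
  simp only [Nat.zero_mod, Nat.cast_zero] at h
  rw [h]
  simp

-- one step of both loops coincides, hence the whole loops do
lemma loop_eq : ∀ (fuel lenq : Nat) (line : List Int) (q : List (Option Int)) (out : List (List Int)),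
    pvLoopA fuel lenq line q out = pvLoopB fuel lenq line q out := by
  intro fuel; induction fuel with
  | zero => intro lenq line q out; rfl
  | succ fuel ih =>
    intro lenq line q out
    by_cases hl : 0 < line.length
    · simp only [pvLoopA, pvLoopB, if_pos hl]
      rw [count_none_eq, fillB_eq, fillA_eq line q, count_fillSpec]
      by_cases hz : q.count (none : Option Int) - min (q.count (none : Option Int)) line.length = 0
      · rw [fixedA_eq, snc_eq, ih]
        simp [hz]
      · simp only [if_neg hz]
        exact ih _ _ _ _
    · simp [pvLoopA, pvLoopB, hl]

-- ===== VERDICT (by name: the statement is the Claim_ definition above) =====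
theorem line_fixer_spec : Claim_equal_line_fixer := by
  intro line queue_lst output_list _
  unfold Spec_line_fixer line_fixer line_fixer_alt
  exact loop_eq _ _ _ _ _
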